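-- pv_equiv track=rewrite | github.com/coinkite/bitcoinbinary.org | helper_scripts/speedup_video.py | get_segments_to_keep
-- ===== SOURCE A (Python) =====
-- def get_segments_to_keep(frozen_segments, keep_seconds):
--     """Takes a list of tuples of "frozen" segments and returns a list of tuples of the form (start, end) of segments to keep."""
--
--     segments_to_keep = []
--
--     segments_to_keep.append((0, frozen_segments[0][0] + keep_seconds))
--
--     for idx, (freeze_start, freeze_end) in enumerate(frozen_segments):
--         if idx == len(frozen_segments) - 1:
--             # using arbitrary large number as a placeholder for the end of the video.
--             segments_to_keep.append((freeze_end, 9999999))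
--         else:
--             segments_to_keep.append(
--                 (freeze_end, frozen_segments[idx + 1][0] + keep_seconds)
--             )
--
--     return segments_to_keep
-- ===== SOURCE B (Python) =====
-- def get_segments_to_keep(frozen_segments, keep_seconds):
--     """Takes a list of tuples of "frozen" segments and returns a list of tuples of the form (start, end) of segments to keep."""
--     first_start, first_end = frozen_segments[0]
--
--     def keep_from(prev_end, remaining):
--         if not remaining:
--             return [(prev_end, 9999999)]
--         freeze_start, freeze_end = remaining[0]
--         return [(prev_end, freeze_start + keep_seconds)] + keep_from(freeze_end, remaining[1:])
--
--     return [(0, first_start + keep_seconds)] + keep_from(first_end, frozen_segments[1:])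
-- ===== Notes on version B (the rewrite author's own statement) =====
-- stated objective: alternative
-- what changed: Replaces A's indexed loop with an idx+1 lookahead and a last-index conditional by a recursion that carries the previous freeze end forward, pairing the carried end with the current freeze start; no indexing, no length test, no lookahead.
import Mathlib
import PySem

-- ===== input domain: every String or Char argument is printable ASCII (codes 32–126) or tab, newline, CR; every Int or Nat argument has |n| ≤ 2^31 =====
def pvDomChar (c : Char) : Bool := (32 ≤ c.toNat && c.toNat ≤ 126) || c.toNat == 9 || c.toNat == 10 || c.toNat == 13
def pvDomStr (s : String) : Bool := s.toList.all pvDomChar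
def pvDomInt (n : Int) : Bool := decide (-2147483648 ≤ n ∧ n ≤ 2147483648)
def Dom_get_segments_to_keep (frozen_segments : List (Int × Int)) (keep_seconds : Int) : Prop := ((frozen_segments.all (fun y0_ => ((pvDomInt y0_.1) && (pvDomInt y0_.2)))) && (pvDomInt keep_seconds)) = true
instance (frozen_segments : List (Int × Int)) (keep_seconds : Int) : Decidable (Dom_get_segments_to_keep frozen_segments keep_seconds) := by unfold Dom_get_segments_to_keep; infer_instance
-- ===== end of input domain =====

-- B replaces A's indexed loop with an idx+1 lookahead and a last-index conditional by a recursion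
-- carrying the previous freeze end forward; an alternative decomposition, same cost.


-- ===== PORT A =====
def get_segments_to_keep (frozen_segments : List (Int × Int)) (keep_seconds : Int) : List (Int × Int) :=
  match PySem.List.pyGet? frozen_segments 0 with
  | none => []   -- IndexError (empty list); excluded by Pre_
  | some first =>
    let segments_to_keep : List (Int × Int) := [((0 : Int), first.1 + keep_seconds)]
    (PySem.List.enumerate frozen_segments).foldl
      (fun acc p =>
        if p.1 = (frozen_segments.length : Int) - 1 then
          acc ++ [(p.2.2, 9999999)]
        else
          acc ++ [(p.2.2, ((PySem.List.pyGet? frozen_segments (p.1 + 1)).map Prod.fst).getD 0 + keep_seconds)])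
      segments_to_keep

-- ===== PORT B =====
-- keep_from: recursion over the remaining segments, carrying the previous freeze end.
def keepFrom (keep_seconds : Int) (prev_end : Int) : List (Int × Int) → List (Int × Int)
  | [] => [(prev_end, 9999999)]
  | (freeze_start, freeze_end) :: remaining =>
      [(prev_end, freeze_start + keep_seconds)] ++ keepFrom keep_seconds freeze_end remaining

def get_segments_to_keep_alt (frozen_segments : List (Int × Int)) (keep_seconds : Int) : List (Int × Int) :=
  match PySem.List.pyGet? frozen_segments 0 with
  | none => []   -- IndexError (empty list); excluded by Pre_
  | some first =>
    [((0 : Int), first.1 + keep_seconds)] ++ keepFrom keep_seconds first.2 (PySem.List.slice frozen_segments (some 1) none)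

-- ===== PRECONDITION & SPEC =====
-- A indexes frozen_segments[0][0] unconditionally, so it raises IndexError on the empty list.
def Pre_get_segments_to_keep (frozen_segments : List (Int × Int)) (keep_seconds : Int) : Prop :=
  frozen_segments ≠ []
instance (frozen_segments : List (Int × Int)) (keep_seconds : Int) : Decidable (Pre_get_segments_to_keep frozen_segments keep_seconds) := by unfold Pre_get_segments_to_keep; infer_instance
def pvWitness_get_segments_to_keep : (List (Int × Int)) × Int := ([(5, 10), (20, 25)], 2)

def Spec_get_segments_to_keep (frozen_segments : List (Int × Int)) (keep_seconds : Int) (out : List (Int × Int)) : Prop := out = get_segments_to_keep_alt frozen_segments keep_seconds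
instance (frozen_segments : List (Int × Int)) (keep_seconds : Int) (out : List (Int × Int)) : Decidable (Spec_get_segments_to_keep frozen_segments keep_seconds out) := by unfold Spec_get_segments_to_keep; infer_instance

-- ===== CLAIM (what is proved, stated in full; the proofs are below) =====
def Claim_equal_get_segments_to_keep : Prop := ∀ (frozen_segments : List (Int × Int)) (keep_seconds : Int), Dom_get_segments_to_keep frozen_segments keep_seconds → Pre_get_segments_to_keep frozen_segments keep_seconds → Spec_get_segments_to_keep frozen_segments keep_seconds (get_segments_to_keep frozen_segments keep_seconds)

-- ===== LEMMAS AND PROOFS =====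

theorem foldl_if_append {α β : Type} (l : List α) (c : α → Prop) [DecidablePred c]
    (f g : α → β) (init : List β) :
    l.foldl (fun acc x => if c x then acc ++ [f x] else acc ++ [g x]) init
      = init ++ l.map (fun x => if c x then f x else g x) := by
  induction l generalizing init with
  | nil => simp
  | cons a l ih =>
    by_cases hc : c a <;> simp [List.foldl_cons, hc, ih]

theorem keepFrom_length (k e : Int) (ts : List (Int × Int)) :
    (keepFrom k e ts).length = ts.length + 1 := by
  induction ts generalizing e with
  | nil => simp [keepFrom]
  | cons a l ih => simp [keepFrom, ih]

theorem keepFrom_getElem (k e : Int) (ts : List (Int × Int)) (j : Nat)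
    (hj : j < ts.length + 1) :
    (keepFrom k e ts)[j]'(by rw [keepFrom_length]; omega)
      = ((e :: ts.map Prod.snd)[j]'(by simp; omega),
         if h : j = ts.length then 9999999 else (ts[j]'(by omega)).1 + k) := by
  induction ts generalizing e j with
  | nil =>
    have : j = 0 := by simp only [List.length_nil] at hj; omega
    subst this
    simp [keepFrom]
  | cons a l ih =>
    cases j with
    | zero => simp [keepFrom]
    | succ j =>
      have hj' : j < l.length + 1 := by simpa using Nat.lt_of_succ_lt_succ hj
      have := ih a.2 j hj'
      simp only [keepFrom, List.cons_append, List.nil_append, List.getElem_cons_succ,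
        List.map_cons, List.length_cons]
      rw [this]
      by_cases hl : j = l.length
      · simp [hl]
      · simp [hl]

theorem cons_eq (h : Int × Int) (t : List (Int × Int)) (k : Int) :
    get_segments_to_keep (h :: t) k = get_segments_to_keep_alt (h :: t) k := by
  unfold get_segments_to_keep get_segments_to_keep_alt
  rw [PySem.List.pyGet?_zero_cons]
  simp only
  rw [foldl_if_append]
  have hslice : PySem.List.slice (h :: t) (some 1) none = t := by
    simp [PySem.List.slice_from_one]
  rw [hslice]
  congr 1
  apply List.ext_getElem
  · simp [PySem.List.length_enumerate, keepFrom_length]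
  · intro j hj1 hj2
    have hlen : j < t.length + 1 := by
      simpa [PySem.List.length_enumerate] using hj1
    rw [keepFrom_getElem k h.2 t j hlen]
    simp only [List.getElem_map, PySem.List.getElem_enumerate]
    by_cases hlast : j = t.length
    · have hc : (0 : Int) + (j : Int) = ((h :: t).length : Int) - 1 := by
        simp [hlast]
      subst hlast
      have hm : (h.2 :: List.map Prod.snd t)[t.length]'(by simp) = ((h :: t).map Prod.snd)[t.length]'(by simp) := rfl
      simp [hc, hm]
      rw [List.getElem_map]
    · have hc : ¬ ((0 : Int) + (j : Int) = ((h :: t).length : Int) - 1) := by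
        simp only [List.length_cons]
        push_cast
        omega
      rw [if_neg hc]
      have hj : j < t.length := by omega
      have hidx : (0 : Int) + (j : Int) + 1 = ((j + 1 : Nat) : Int) := by push_cast; ring
      rw [hidx, PySem.List.pyGet?_natCast]
      have hget : (h :: t)[j + 1]? = some t[j] := by
        simp [hj]
      rw [hget]
      have hm : (h.2 :: List.map Prod.snd t)[j]'(by simp; omega) = ((h :: t).map Prod.snd)[j]'(by simp; omega) := rfl
      simp [hlast, hm]
      rw [List.getElem_map]

-- ===== VERDICT (by name: the statement is the Claim_ definition above) =====
theorem get_segments_to_keep_spec : Claim_equal_get_segments_to_keep := by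
  intro fs k _ hpre
  unfold Spec_get_segments_to_keep
  match fs, hpre with
  | h :: t, _ => exact cons_eq h t k
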